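-- pv_equiv track=rewrite | github.com/lunageens/BasicPython | src/main/Woordevoluties.py | codeer_woord
-- ===== SOURCE A (Python) =====
-- def codeer_woord(woord, hoofdletter):
--     """"
--     Deze functie gebruikt de volgende codeer methode om het woord te coderen:
--     1. We nemen de eerste letter van het ingegeven woord. We tellen hoeveel letters er tussen deze letter zitten en de
--     ingegeven hoofdletter.
--     2. We verschuiven alle andere letters van het ingegeven woord met hetzelfde aantal plaatsjes in het alfabet. Als we
--     Z tegenkomen, dan herstarten we bij A.
--     3. Als uitvoer, printen we voor elke letter van het ingegeven woord een lijn. De lijn start met de betreffende hoofdletter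
--     van het ingegeven woord aan de linkerkant. Dan komen alle letters van het alfabet die er tussen zitten in kleine letters.
--     Daarna komt er in een hoofdletter de bekomen hoofdletter van het gecodeerde woord aan de linkerkant.
--
--     Opmerkingen:
--     (1) Vind hoeveel letters het alfabet verschuift door de afstand tussen de eerste letter van het woord en de hoofdletter te
--     berekenen. Ord() geeft de Unicode van characters terug. De functie chr() zet die Unicode terug om in een character (letter).
--     Bijvoorbeeld, ord('A') geeft 65 terug, wat de Unicode-code is voor hoofdletter A.
--     Alle Unicodes vindt je op: https://towardsdatascience.com/processing-text-with-unicode-in-python-eacc226886cb (kolommen char en Dec)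
--
--     (2) De hoofdletter en kleine letter hebben steeds andere Unicodes. In principe zou je dit allemaal in dezelfde lus
--     kunnen doen, maar dan is het minder duidelijk. Met de enumerate() functie kan je ook de variable 'index' meegeven.
--
--     (3) Bij de start doe je plus 1, omdat in range(start,stop) de start meegegeven wordt, en we hebben de hoofdletter
--     van start al toegevoegd aan de lijn. Bij de stop doe je dat niet, omdat in range(start,stop) de stop niet
--     meegegeven wordt, en we zullen de hoofdletter van stop later apart toevoegen aan de lijn.
--
--     (4) De afwezigheid van deze lijn is de redenen waardoor je vorig programma wel werkte bij 'FREUD' en 'C' naar 'COBRA'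
--     en vice versa, maar niet bij 'LAYOUT' en 'F' naar 'FUSION' en omgekeerd. In beide gevallen is de verschuiving negatief:
--     de eerste letter van het ingegeven woord staat in het alfabet verder dan de ingegeven hoofdletter waarmee je het woord
--     codeert. Maar enkel in het laatste geval zorgt die negatieve verschuiving ervoor dat het gecodeerde woord letters
--     bevat die verder dan het begin van het alfabet liggen. Ik illustreer wat ik bedoel met een voorbeeld:
--     Bij FREUD en C, is de verschuiving gelijk aan -3. Problemen zouden zich vormen als FREUD letters bevat die A, B, of C
--     zijn (de eerste drie letters van het alfabet), maar dat is niet het geval.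
--     Daarentegen, bij LAYOUT en F, is de verschuiving gelijk aan -6. Er vormen zich problemen als het woord LAYOUT
--     de eerste zes letters van het alfabet bevat. Dit is het geval bij de A: een verschuiving van -6 geeft een unicode op
--     dat geen hoofdletter is. We gaan van ord('A')=65 naar ord(';')=59. Zonder deze lijn zou het gecodeerde woord
--     F;SION worden. We moeten bij de 'A' terug de 'wrapping' toepassen die we ook bij 'Z' hebben gedaan om binnen het bereik
--     van de hoofdletters A-Z te blijven. Door 26 op te tellen bij de unicode, zal de verschuiving terug resulteren aan
--     een hoofdletter.
--     De redenen dat we deze wrappings niet gebruiken voor de kleine letters, is omdat we hier die verschillende ranges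
--     kunnen gebruiken. Als de startletter (in kleine letters) in het alfabet vóór de stopletter komt, gebruikt u een
--     directe reeks. Als de startletter echter na de stopletter komt (zoals van 'y' naar 'c'), dan splitst u de reeks op
--     in twee delen: van de startletter tot 'z', en dan van 'a' tot de stopletter. Dit splitst in feite de reeks op een
--     manier die 'wrapping' nabootst zonder dat u expliciet hoeft te controleren of u voorbij 'z' gaat.
--     """
--     verschuiving = ord(hoofdletter) - ord(woord[0])  # Hoeveel letters we verschuiven in het alfabet. (1)
--
--     codewoord = ''
--     for letter in woord:
--         # We coderen elke letter van het ingegeven woord.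
--         unicode_codeletter = ord(letter) + verschuiving  # Bereken de nieuwe Unicode van de letter.
--         if unicode_codeletter > ord('Z'):
--             # Als het verder dan 'Z' gaat, begin opnieuw door totaal aantal letters in alfabet af te trekken.
--             unicode_codeletter -= 26
--         elif unicode_codeletter < ord('A'):
--             # Als het minder dan 'A' gaat, begin opnieuw door totaal aantal letters in alfabet op te tellen. (4)
--             unicode_codeletter += 26
--         codewoord += chr(unicode_codeletter)  # Voeg de gecodeerde letter toe, door terug om te zetten vanuit Unicode.
--
--     lijnen = []
--     for index, letter in enumerate(woord):  # (2)
--         lijn = letter  # Voeg de hoofdletter toe aan de lijn.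
--
--         start = ord(letter.lower()) + 1  # De kleine letter van het initele woord, omgezet in Unicode. (3)
--         stop = ord(codewoord[index].lower())  # De kleine letter van het gecodeerde woord, omgezet in Unicode. (3)
--
--         if start <= stop:
--             # Er komt geen z in de kleine letters voor.
--             for i in range(start, stop):
--                 lijn += chr(i)  # Voeg de omgezette kleine letters toe aan de lijn.
--         else:  # Er komt wel een Z in de kleine letters voor.
--             # We gebruiken twee afzonderlijke ranges om dit op te lossen.
--             for i in range(start, ord('z') + 1):  # Door die +1 te doen, zorg je dat de 'z' ook in de range komt.
--                 lijn += chr(i)  # Voeg de omgezette kleine letters toe aan de lijn.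
--             for i in range(ord('a'), stop):
--                 lijn += chr(i)  # Voeg de omgezette kleine letters toe aan de lijn.
--
--         lijn += codewoord[index]  # Voeg de gecodeerde hoofdletter toe aan de lijn.
--         lijnen.append(lijn)  # Voeg de lijn toe aan de lijnen lijst.
--
--     return lijnen
-- ===== SOURCE B (Python) =====
-- def codeer_woord(woord, hoofdletter):
--     # Memo table over distinct letters: each letter's line is computed ONCE and
--     # the word is rendered by dictionary lookup; the wrap is branch-free
--     # arithmetic and the middle is a flattened list of (start, stop) segments.
--     verschuiving = ord(hoofdletter) - ord(woord[0])
--     tabel = {}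
--     for letter in woord:
--         if letter in tabel:
--             continue
--         code = ord(letter) + verschuiving
--         code += 26 * ((code < 65) - (code > 90))  # branch-free wrap into A..Z
--         codeletter = chr(code)
--         start, stop = ord(letter.lower()) + 1, ord(codeletter.lower())
--         stukken = [(start, stop)] if start <= stop else [(start, 123), (97, stop)]
--         midden = ''.join(chr(i) for a, b in stukken for i in range(a, b))
--         tabel[letter] = letter + midden + codeletter
--     return [tabel[letter] for letter in woord]
-- ===== Notes on version B (the rewrite author's own statement) =====
-- stated objective: alternative
-- what changed: A builds the whole coded word in a first pass and then re-walks the word by index appending range characters one by one; B instead builds a memo dictionary mapping each DISTINCT letter to its finished line (computed once, with a branch-free arithmetic wrap and the middle expressed as a flattened segment list) and renders the word by dictionary lookup, so duplicate letters are never recomputed.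
import Mathlib
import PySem

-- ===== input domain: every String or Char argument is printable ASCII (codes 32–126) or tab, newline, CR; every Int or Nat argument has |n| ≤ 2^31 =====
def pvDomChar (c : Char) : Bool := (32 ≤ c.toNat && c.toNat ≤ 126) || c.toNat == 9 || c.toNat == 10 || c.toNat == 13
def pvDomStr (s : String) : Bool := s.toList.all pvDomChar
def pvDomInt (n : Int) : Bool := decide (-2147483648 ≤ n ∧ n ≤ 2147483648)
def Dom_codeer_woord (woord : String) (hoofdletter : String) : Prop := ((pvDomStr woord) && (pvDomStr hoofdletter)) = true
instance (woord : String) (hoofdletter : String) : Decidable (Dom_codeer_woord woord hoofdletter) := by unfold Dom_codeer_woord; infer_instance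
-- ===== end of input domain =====

-- B replaces A's build-coded-word-then-reindex design by a memo dictionary from each
-- DISTINCT letter to its finished line (branch-free arithmetic wrap, segment-list middle),
-- rendering the word by lookup; objective: alternative.


-- Python str.lower() for ONE character, hand-ported: exact for every code point ≤ 0xFF
-- (verified against CPython over that whole range); both programs only apply it to
-- characters with code ≤ 248, so the port is exact wherever it is used.
def pyLowerByte (c : Char) : Char :=
  let n := c.toNat
  if (65 ≤ n ∧ n ≤ 90) ∨ (192 ≤ n ∧ n ≤ 222 ∧ n ≠ 215) then Char.ofNat (n + 32) else c

-- ===== PORT A =====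
-- ord(woord[0]) / ord(hoofdletter): Pre_ guarantees woord ≠ '' and |hoofdletter| = 1,
-- so headD's default is never read; chr(u) = Char.ofNat u.toNat (Pre_ keeps u ≥ 0).
def codeer_woord (woord : String) (hoofdletter : String) : List String :=
  let w := woord.toList
  let verschuiving : Int := ((hoofdletter.toList.headD ' ').toNat : Int) - ((w.headD ' ').toNat : Int)
  let codewoord : List Char :=
    w.foldl (fun codewoord letter =>
      let u : Int := (letter.toNat : Int) + verschuiving
      let u : Int := if u > 90 then u - 26 else if u < 65 then u + 26 else u
      codewoord ++ [Char.ofNat u.toNat]) []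
  (PySem.List.enumerate w).foldl (fun lijnen p =>
    let letter := p.2
    let lijn : List Char := [letter]
    let start : Int := ((pyLowerByte letter).toNat : Int) + 1
    -- codewoord[index]: the index from enumerate is always in range (|codewoord| = |woord|)
    let stop : Int := ((pyLowerByte (PySem.List.pyGetD codewoord p.1 ' ')).toNat : Int)
    let lijn : List Char :=
      if start ≤ stop then
        (PySem.List.pyRange start stop 1).foldl (fun l i => l ++ [Char.ofNat i.toNat]) lijn
      else
        let lijn := (PySem.List.pyRange start 123 1).foldl (fun l i => l ++ [Char.ofNat i.toNat]) lijn
        (PySem.List.pyRange 97 stop 1).foldl (fun l i => l ++ [Char.ofNat i.toNat]) lijn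
    let lijn := lijn ++ [PySem.List.pyGetD codewoord p.1 ' ']
    lijnen ++ [String.ofList lijn]) []

-- ===== PORT B =====
-- one memoised line per distinct letter
def lijnB (v : Int) (letter : Char) : String :=
  let code : Int := (letter.toNat : Int) + v
  let code : Int := code + 26 * ((if code < 65 then (1:Int) else 0) - (if code > 90 then (1:Int) else 0))
  let codeletter := Char.ofNat code.toNat
  let start : Int := ((pyLowerByte letter).toNat : Int) + 1
  let stop : Int := ((pyLowerByte codeletter).toNat : Int)
  let stukken : List (Int × Int) := if start ≤ stop then [(start, stop)] else [(start, 123), (97, stop)]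
  let midden : List Char := stukken.flatMap (fun p => (PySem.List.pyRange p.1 p.2 1).map (fun i => Char.ofNat i.toNat))
  String.ofList (letter :: (midden ++ [codeletter]))

def codeer_woord_alt (woord : String) (hoofdletter : String) : List String :=
  let verschuiving : Int :=
    ((hoofdletter.toList.headD ' ').toNat : Int) - ((woord.toList.headD ' ').toNat : Int)
  let tabel : PySem.Dict Char String :=
    woord.toList.foldl (fun t letter =>
      if t.contains letter then t else t.insert letter (lijnB verschuiving letter))
      PySem.Dict.empty
  -- tabel[letter]: every letter of the word is a key of tabel, so the default is never read
  woord.toList.map (fun letter => tabel.getD letter "")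

-- ===== PRECONDITION & SPEC =====
-- Pre_ excludes exactly the inputs where Python A raises: empty woord (IndexError on
-- woord[0]), hoofdletter not a single character (TypeError in ord), and a letter whose
-- shifted-and-wrapped code stays negative (ValueError in chr).
def Pre_codeer_woord (woord : String) (hoofdletter : String) : Prop :=
  woord.toList ≠ [] ∧ hoofdletter.toList.length = 1 ∧
  (woord.toList.all (fun c =>
    decide ((woord.toList.headD ' ').toNat ≤ c.toNat + (hoofdletter.toList.headD ' ').toNat + 26))) = true
instance (woord : String) (hoofdletter : String) : Decidable (Pre_codeer_woord woord hoofdletter) := by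
  unfold Pre_codeer_woord; infer_instance

def pvWitness_codeer_woord : String × String := ("A", "A")

def Spec_codeer_woord (woord : String) (hoofdletter : String) (out : List String) : Prop := out = codeer_woord_alt woord hoofdletter
instance (woord : String) (hoofdletter : String) (out : List String) : Decidable (Spec_codeer_woord woord hoofdletter out) := by unfold Spec_codeer_woord; infer_instance

-- ===== CLAIM (what is proved, stated in full; the proofs are below) =====
def Claim_equal_codeer_woord : Prop := ∀ (woord : String) (hoofdletter : String), Dom_codeer_woord woord hoofdletter → Pre_codeer_woord woord hoofdletter → Spec_codeer_woord woord hoofdletter (codeer_woord woord hoofdletter)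

-- ===== LEMMAS AND PROOFS =====

-- a foldl that only appends singletons is a map
theorem foldl_append_singleton {α β : Type} (f : α → β) (xs : List α) (init : List β) :
    xs.foldl (fun l x => l ++ [f x]) init = init ++ xs.map f := by
  induction xs generalizing init with
  | nil => simp
  | cons x xs ih => simp [List.foldl, ih]

theorem codewoord_eq (v : Int) (w : List Char) :
    (w.foldl (fun codewoord letter =>
      let u : Int := (letter.toNat : Int) + v
      let u : Int := if u > 90 then u - 26 else if u < 65 then u + 26 else u
      codewoord ++ [Char.ofNat u.toNat]) []) =
    w.map (fun letter =>
      let u : Int := (letter.toNat : Int) + v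
      let u : Int := if u > 90 then u - 26 else if u < 65 then u + 26 else u
      Char.ofNat u.toNat) := by
  simpa using foldl_append_singleton
    (fun letter =>
      let u : Int := (letter.toNat : Int) + v
      let u : Int := if u > 90 then u - 26 else if u < 65 then u + 26 else u
      Char.ofNat u.toNat) w []

-- the branch-free wrap equals A's if/elif wrap
theorem wrap_eq (u : Int) :
    (if u > 90 then u - 26 else if u < 65 then u + 26 else u) =
    u + 26 * ((if u < 65 then (1:Int) else 0) - (if u > 90 then (1:Int) else 0)) := by
  split_ifs <;> omega

-- B's memo loop: after the fold, every letter occurring in the word is mapped to f letter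
theorem memo_get? {ν : Type} (f : Char → ν) (w : List Char) (t : PySem.Dict Char ν)
    (hinv : ∀ c s, t.get? c = some s → s = f c) (c : Char)
    (hc : c ∈ w ∨ (t.get? c).isSome) :
    (w.foldl (fun t letter => if t.contains letter then t else t.insert letter (f letter)) t).get? c
      = some (f c) := by
  induction w generalizing t with
  | nil =>
    rcases hc with h | h
    · cases h
    · obtain ⟨s, hs⟩ := Option.isSome_iff_exists.mp h
      simp only [List.foldl]
      rw [hs, hinv c s hs]
  | cons a w ih =>
    simp only [List.foldl]
    by_cases hca : t.contains a = true
    · rw [if_pos hca]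
      apply ih t hinv
      rcases hc with h | h
      · rcases List.mem_cons.mp h with rfl | h
        · right; rwa [PySem.Dict.contains_eq_isSome_get?] at hca
        · exact Or.inl h
      · exact Or.inr h
    · rw [if_neg hca]
      have hinv' : ∀ c s, (t.insert a (f a)).get? c = some s → s = f c := by
        intro c s hs
        rw [PySem.Dict.get?_insert] at hs
        by_cases hce : c = a
        · rw [if_pos hce] at hs
          rw [hce]
          exact (Option.some.inj hs).symm
        · exact hinv c s (by rwa [if_neg hce] at hs)
      apply ih _ hinv'
      rcases hc with h | h
      · rcases List.mem_cons.mp h with rfl | h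
        · right; rw [PySem.Dict.get?_insert, if_pos rfl]; rfl
        · exact Or.inl h
      · right
        rw [PySem.Dict.get?_insert]
        by_cases hce : c = a
        · rw [if_pos hce]; rfl
        · rwa [if_neg hce]

theorem alt_eq_map (woord hoofdletter : String) :
    codeer_woord_alt woord hoofdletter =
    woord.toList.map (lijnB (((hoofdletter.toList.headD ' ').toNat : Int)
      - ((woord.toList.headD ' ').toNat : Int))) := by
  unfold codeer_woord_alt
  apply List.map_congr_left
  intro c hc
  have := memo_get? (lijnB (((hoofdletter.toList.headD ' ').toNat : Int)
      - ((woord.toList.headD ' ').toNat : Int))) woord.toList PySem.Dict.empty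
    (by intro c s hs; simp [PySem.Dict.get?_empty] at hs) c (Or.inl hc)
  rw [PySem.Dict.getD_eq_get?_getD, this]
  rfl

theorem codeer_woord_spec : Claim_equal_codeer_woord := by
  intro woord hoofdletter _hdom _hpre
  unfold Spec_codeer_woord codeer_woord
  rw [alt_eq_map]
  set v : Int :=
    ((hoofdletter.toList.headD ' ').toNat : Int) - ((woord.toList.headD ' ').toNat : Int) with hv
  set w := woord.toList with hw
  simp only [codewoord_eq]
  rw [foldl_append_singleton
    (f := fun p : Int × Char =>
      let letter := p.2
      let lijn : List Char := [letter]
      let start : Int := ((pyLowerByte letter).toNat : Int) + 1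
      let stop : Int := ((pyLowerByte (PySem.List.pyGetD (w.map (fun letter =>
          let u : Int := (letter.toNat : Int) + v
          let u : Int := if u > 90 then u - 26 else if u < 65 then u + 26 else u
          Char.ofNat u.toNat)) p.1 ' ')).toNat : Int)
      let lijn : List Char :=
        if start ≤ stop then
          (PySem.List.pyRange start stop 1).foldl (fun l i => l ++ [Char.ofNat i.toNat]) lijn
        else
          let lijn := (PySem.List.pyRange start 123 1).foldl (fun l i => l ++ [Char.ofNat i.toNat]) lijn
          (PySem.List.pyRange 97 stop 1).foldl (fun l i => l ++ [Char.ofNat i.toNat]) lijn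
      String.ofList (lijn ++ [PySem.List.pyGetD (w.map (fun letter =>
          let u : Int := (letter.toNat : Int) + v
          let u : Int := if u > 90 then u - 26 else if u < 65 then u + 26 else u
          Char.ofNat u.toNat)) p.1 ' ']))]
  refine List.ext_getElem (by simp [PySem.List.length_enumerate]) ?_
  intro k h1 h2
  simp only [List.nil_append, List.getElem_map, PySem.List.getElem_enumerate]
  have hk : k < w.length := by simpa using h2
  rw [PySem.List.pyGetD_eq_getElem _ ' ' (by positivity)
        (by simpa using hk)]
  simp only [zero_add, Int.toNat_natCast, List.getElem_map]
  set letter := w[k]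
  show _ = lijnB v letter
  unfold lijnB
  simp only [← wrap_eq]
  simp only [foldl_append_singleton]
  split_ifs with hss <;> simp [List.flatMap]
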